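-- pv_equiv track=rewrite | github.com/christullier/seth | cyberstorm/challenges/amnesia/Home/Music/bops/ftp-permissions.py | TenBitConversion
-- ===== SOURCE A (Python) =====
-- def ConvertPermsToBinary(str):
--     converted = ""
--     # read every character in the permissions
--     for char in str:
--         # if the character is a dash (no permission), then represent it as 0
--         if(char == "-"):
--             converted += "0"
--         # otherwise, represent it as 1
--         else:
--             converted += "1"
--
--     return converted
--
-- def TenBitConversion(data):
--     # concatenate all of the coverted binary permissions in a string
--     binaryData = ""
--     for permission in data:
--         binaryData += ConvertPermsToBinary(permission)
--
--     # separate the binary permissions into 7-bits and add them to a list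
--     modifiedData = []
--     str = ""
--     count = 0
--
--     for char in binaryData:
--         # if the current character is the 6 of 7 bit
--         if(count == 6):
--             # then add the last character to str, append the 7-bits to the list, and reset str and count
--             str += char
--             modifiedData.append(str)
--             str = ""
--             count = 0
--         # otherwise, add the character to str and increment the counter
--         else:
--             str += char
--             count += 1
--
--     # convert the list of binary permissions into a message using ConvertPermsToBinary()
--     message = ""
--     for permission in modifiedData:
--         message += chr(int(permission, 2))
--
--     return message
-- ===== SOURCE B (Python) =====
-- def TenBitConversion(data):
--     bits = ''.join('0' if c == '-' else '1' for permission in data for c in permission)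
--     message = ''
--     i = 0
--     while i + 7 <= len(bits):
--         message += chr(int(bits[i:i+7], 2))
--         i += 7
--     return message
-- ===== Notes on version B (the rewrite author's own statement) =====
-- stated objective: simpler
-- what changed: Replaces A's three accumulator loops (per-char bit building, a char-by-char counter/state chunker, then a decode loop) with one join comprehension for the bit string and a single slice-7-at-a-time loop that decodes each chunk directly, dropping the counter and intermediate list.
import Mathlib
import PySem

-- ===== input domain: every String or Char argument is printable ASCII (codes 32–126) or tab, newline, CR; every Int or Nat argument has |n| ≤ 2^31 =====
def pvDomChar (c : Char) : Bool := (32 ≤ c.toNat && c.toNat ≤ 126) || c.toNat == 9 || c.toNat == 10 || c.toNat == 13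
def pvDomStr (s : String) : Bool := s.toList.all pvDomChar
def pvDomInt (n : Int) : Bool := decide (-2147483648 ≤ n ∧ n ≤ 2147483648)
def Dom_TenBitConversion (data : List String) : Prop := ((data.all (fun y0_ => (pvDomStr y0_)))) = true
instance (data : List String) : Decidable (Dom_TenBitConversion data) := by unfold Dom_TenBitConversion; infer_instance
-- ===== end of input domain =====

-- B replaces A's three accumulator loops (bit building, counter-based chunking into a list,
-- decoding) by one join/flatMap for the bit string and a single slice-7-then-decode loop: simpler.

-- chr(int(p, 2)) — p is always a nonempty chunk of '0'/'1' chars here, so the parse never fails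
-- (the .getD 0 default is unreachable); both Python versions decode a chunk with this expression.
def chrDecode (p : List Char) : Char := Char.ofNat ((PySem.Int.ofCharsBase? p 2).getD 0).toNat

-- ===== PORT A =====
-- strings are carried as List Char ('converted += …' = list append); String.mk at the very end
def convertPermsToBinary (s : String) : List Char :=
  s.toList.foldl (fun converted char => converted ++ (if char = '-' then ['0'] else ['1'])) []

def TenBitConversion (data : List String) : String :=
  let binaryData := data.foldl (fun acc permission => acc ++ convertPermsToBinary permission) []
  let st := binaryData.foldl
      (fun (acc : List (List Char) × List Char × Nat) char =>
        let md := acc.1; let s := acc.2.1; let count := acc.2.2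
        if count = 6 then (md ++ [s ++ [char]], [], 0)
        else (md, s ++ [char], count + 1))
      ([], [], 0)
  let message := st.1.foldl (fun msg permission => msg ++ [chrDecode permission]) []
  String.mk message

-- ===== PORT B =====
-- while i + 7 <= len(bits): decode bits[i:i+7]; i += 7
-- bits[i:i+7] for 0 ≤ i is exactly (bits.drop i).take 7 (nonneg in-range slice)
def decodeLoop (bits : List Char) (i : Nat) (message : List Char) : List Char :=
  if i + 7 ≤ bits.length then
    decodeLoop bits (i + 7) (message ++ [chrDecode ((bits.drop i).take 7)])
  else message
termination_by bits.length - i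

def TenBitConversion_alt (data : List String) : String :=
  let bits := data.flatMap (fun permission =>
    permission.toList.map (fun c => if c = '-' then '0' else '1'))
  String.mk (decodeLoop bits 0 [])

-- ===== PRECONDITION & SPEC =====
def Spec_TenBitConversion (data : List String) (out : String) : Prop := out = TenBitConversion_alt data
instance (data : List String) (out : String) : Decidable (Spec_TenBitConversion data out) := by unfold Spec_TenBitConversion; infer_instance

-- ===== CLAIM (what is proved, stated in full; the proofs are below) =====
def Claim_equal_TenBitConversion : Prop := ∀ (data : List String), Dom_TenBitConversion data → Spec_TenBitConversion data (TenBitConversion data)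

-- ===== LEMMAS AND PROOFS =====

-- functional description of A's counter-based chunker, used to relate the two loops
def chunksFromC (s : List Char) (count : Nat) (l : List Char) : List (List Char) :=
  match l with
  | [] => []
  | c :: t => if count = 6 then (s ++ [c]) :: chunksFromC [] 0 t
              else chunksFromC (s ++ [c]) (count + 1) t

lemma convertPerms_eq_map (s : String) :
    convertPermsToBinary s = s.toList.map (fun c => if c = '-' then '0' else '1') := by
  simp only [convertPermsToBinary, PySem.List.foldl_append_eq_flatMap, List.nil_append]
  induction s.toList with
  | nil => rfl
  | cons c t ih => by_cases h : c = '-' <;> simp [h, ih]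

lemma binaryData_eq (data : List String) :
    data.foldl (fun acc permission => acc ++ convertPermsToBinary permission) [] =
    data.flatMap (fun permission =>
      permission.toList.map (fun c => if c = '-' then '0' else '1')) := by
  simp [convertPerms_eq_map, List.flatMap_def]

lemma chunk_fold_eq (l : List Char) : ∀ (md : List (List Char)) (s : List Char) (count : Nat),
    (l.foldl
      (fun (acc : List (List Char) × List Char × Nat) char =>
        let md := acc.1; let s := acc.2.1; let count := acc.2.2
        if count = 6 then (md ++ [s ++ [char]], [], 0)
        else (md, s ++ [char], count + 1))
      (md, s, count)).1 = md ++ chunksFromC s count l := by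
  induction l with
  | nil => intro md s count; simp [chunksFromC]
  | cons c t ih =>
    intro md s count
    simp only [List.foldl_cons, chunksFromC]
    by_cases h : count = 6 <;> simp [h, ih]

lemma chunksFromC_nil_of_short (l : List Char) : ∀ (s : List Char) (count : Nat),
    l.length + count ≤ 6 → chunksFromC s count l = [] := by
  induction l with
  | nil => intros; rfl
  | cons c t ih =>
    intro s count h
    have hne : count ≠ 6 := by simp at h; omega
    simp only [chunksFromC, hne, if_false]
    exact ih _ _ (by simp at h ⊢; omega)

lemma chunksFromC_step (l : List Char) : ∀ (s : List Char) (count : Nat),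
    count ≤ 6 → 7 - count ≤ l.length →
    chunksFromC s count l =
      (s ++ l.take (7 - count)) :: chunksFromC [] 0 (l.drop (7 - count)) := by
  induction l with
  | nil => intro s count h1 h2; simp at h2; omega
  | cons c t ih =>
    intro s count h1 h2
    by_cases h : count = 6
    · subst h; simp [chunksFromC]
    · have e : 7 - count = (7 - (count + 1)) + 1 := by omega
      simp only [chunksFromC, h, if_false]
      rw [ih (s ++ [c]) (count + 1) (by omega) (by simp at h2 ⊢; omega), e,
        List.take_succ_cons, List.drop_succ_cons]
      simp

lemma decodeLoop_eq (l : List Char) (i : Nat) (msg : List Char) :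
    decodeLoop l i msg = msg ++ (chunksFromC [] 0 (l.drop i)).map chrDecode := by
  fun_induction decodeLoop l i msg with
  | case1 i message h ih =>
      rw [ih, chunksFromC_step (l.drop i) [] 0 (by omega) (by simp; omega)]
      simp [List.drop_drop]
  | case2 i message h =>
      rw [chunksFromC_nil_of_short (l.drop i) [] 0 (by simp; omega)]; simp

-- ===== VERDICT (by name: the statement is the Claim_ definition above) =====
theorem TenBitConversion_spec : Claim_equal_TenBitConversion := by
  intro data _
  show TenBitConversion data = TenBitConversion_alt data
  simp only [TenBitConversion, TenBitConversion_alt, binaryData_eq]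
  rw [chunk_fold_eq, decodeLoop_eq]
  rw [PySem.List.foldl_append_singleton_eq_map]
  simp
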